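-- pv_equiv track=rewrite | github.com/Mahmoud-K-Ismail/Hack-nation | HackathonOrchestrator/discord_bot/security.py | validate_discord_permissions
-- ===== SOURCE A (Python) =====
-- def validate_discord_permissions(permissions: int) -> bool:
--     """Validate that bot has required Discord permissions"""
--     required_permissions = [
--         0x800,      # Send Messages
--         0x2000,     # Manage Messages
--         0x400000,   # Manage Threads
--         0x10000,    # Read Message History
--         0x20000     # Mention Everyone (optional)
--     ]
--
--     for perm in required_permissions[:-1]:  # Exclude optional ones
--         if not (permissions & perm):
--             return False
--
--     return True
-- ===== SOURCE B (Python) =====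
-- REQUIRED_PERMISSION_MASK = 0x800 | 0x2000 | 0x400000 | 0x10000  # the four required bits; 0x20000 is optional
--
--
-- def validate_discord_permissions(permissions: int) -> bool:
--     """Validate that bot has required Discord permissions"""
--     return (permissions & REQUIRED_PERMISSION_MASK) == REQUIRED_PERMISSION_MASK
-- ===== Notes on version B (the rewrite author's own statement) =====
-- stated objective: idiomatic
-- what changed: Replaced the per-bit loop with early return by a single precomputed mask of the four required bits and the closed-form test (permissions & MASK) == MASK.
import Mathlib
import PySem

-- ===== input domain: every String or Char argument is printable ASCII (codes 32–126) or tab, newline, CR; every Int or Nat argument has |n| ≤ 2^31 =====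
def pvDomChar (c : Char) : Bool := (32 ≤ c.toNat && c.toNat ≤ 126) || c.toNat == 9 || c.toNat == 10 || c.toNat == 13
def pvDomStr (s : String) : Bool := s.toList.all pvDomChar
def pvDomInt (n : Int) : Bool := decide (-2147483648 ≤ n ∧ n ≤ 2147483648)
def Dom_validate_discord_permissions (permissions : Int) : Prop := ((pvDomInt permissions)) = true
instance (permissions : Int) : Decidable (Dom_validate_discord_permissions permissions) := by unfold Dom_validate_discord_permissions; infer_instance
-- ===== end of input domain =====

-- B replaces A's per-bit loop (with early return) by one precomputed mask of the
-- four required bits and the closed-form test (permissions & MASK) == MASK (idiomatic).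

-- ===== PORT A =====
-- the for-loop over required_permissions[:-1], returning False at the first missing bit
def pvLoopA (permissions : Int) : List Int → Bool
  | [] => true
  | perm :: rest =>
      if PySem.Int.band permissions perm = 0 then false else pvLoopA permissions rest

def validate_discord_permissions (permissions : Int) : Bool :=
  let required_permissions : List Int := [0x800, 0x2000, 0x400000, 0x10000, 0x20000]
  pvLoopA permissions (PySem.List.slice required_permissions none (some (-1)))

-- ===== PORT B =====
def REQUIRED_PERMISSION_MASK : Int :=
  PySem.Int.bor (PySem.Int.bor (PySem.Int.bor 0x800 0x2000) 0x400000) 0x10000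

def validate_discord_permissions_alt (permissions : Int) : Bool :=
  PySem.Int.band permissions REQUIRED_PERMISSION_MASK == REQUIRED_PERMISSION_MASK

-- ===== PRECONDITION & SPEC =====
def Spec_validate_discord_permissions (permissions : Int) (out : Bool) : Prop := out = validate_discord_permissions_alt permissions
instance (permissions : Int) (out : Bool) : Decidable (Spec_validate_discord_permissions permissions out) := by unfold Spec_validate_discord_permissions; infer_instance

-- ===== CLAIM (what is proved, stated in full; the proofs are below) =====
def Claim_equal_validate_discord_permissions : Prop := ∀ (permissions : Int), Dom_validate_discord_permissions permissions → Spec_validate_discord_permissions permissions (validate_discord_permissions permissions)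

-- ===== LEMMAS AND PROOFS =====

lemma maskBits (k : Nat) (h : Nat.testBit 0x412800 k = true) :
    k = 11 ∨ k = 13 ∨ k = 16 ∨ k = 22 := by
  by_cases hk : k < 23
  · interval_cases k <;> revert h <;> decide
  · rw [Nat.testBit_lt_two_pow (by
      calc (0x412800:Nat) < 2^23 := by norm_num
      _ ≤ 2^k := Nat.pow_le_pow_right (by norm_num) (by omega))] at h
    exact absurd h (by simp)

lemma natA (n : Nat) : (n &&& 0x412800 = 0x412800) ↔
    (n.testBit 11 ∧ n.testBit 13 ∧ n.testBit 16 ∧ n.testBit 22) := by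
  constructor
  · intro h
    have t : ∀ k, (n.testBit k && Nat.testBit 0x412800 k) = Nat.testBit 0x412800 k := by
      intro k; rw [← Nat.testBit_and, h]
    refine ⟨?_, ?_, ?_, ?_⟩
    · simpa [show Nat.testBit 0x412800 11 = true from by decide] using t 11
    · simpa [show Nat.testBit 0x412800 13 = true from by decide] using t 13
    · simpa [show Nat.testBit 0x412800 16 = true from by decide] using t 16
    · simpa [show Nat.testBit 0x412800 22 = true from by decide] using t 22
  · rintro ⟨h1, h2, h3, h4⟩
    apply Nat.eq_of_testBit_eq
    intro k
    rw [Nat.testBit_and]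
    by_cases hM : Nat.testBit 0x412800 k = true
    · rcases maskBits k hM with rfl | rfl | rfl | rfl <;> simp [*]
    · simp [eq_false_of_ne_true hM]

lemma natB (m : Nat) : (0x412800 &&& m = 0) ↔
    (¬ m.testBit 11 ∧ ¬ m.testBit 13 ∧ ¬ m.testBit 16 ∧ ¬ m.testBit 22) := by
  constructor
  · intro h
    have t : ∀ k, (Nat.testBit 0x412800 k && m.testBit k) = false := by
      intro k; rw [← Nat.testBit_and, h]; simp
    refine ⟨?_, ?_, ?_, ?_⟩
    · simpa [show Nat.testBit 0x412800 11 = true from by decide] using t 11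
    · simpa [show Nat.testBit 0x412800 13 = true from by decide] using t 13
    · simpa [show Nat.testBit 0x412800 16 = true from by decide] using t 16
    · simpa [show Nat.testBit 0x412800 22 = true from by decide] using t 22
  · rintro ⟨h1, h2, h3, h4⟩
    apply Nat.eq_of_testBit_eq
    intro k
    rw [Nat.testBit_and]
    by_cases hM : Nat.testBit 0x412800 k = true
    · rcases maskBits k hM with rfl | rfl | rfl | rfl <;> simp_all
    · simp [eq_false_of_ne_true hM]

lemma bitNe (n k : Nat) : (¬ (n &&& 2^k = 0)) ↔ n.testBit k = true := by
  rw [Nat.and_two_pow]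
  cases h : n.testBit k <;> simp [h, Nat.pow_eq_zero]

lemma bitNeg (m k : Nat) : (¬ ((2^k - (2^k &&& m) : Nat) = 0)) ↔ ¬ (m.testBit k = true) := by
  rw [Nat.and_comm, Nat.and_two_pow]
  cases h : m.testBit k <;> simp [h, Nat.pow_eq_zero]

-- band p MASK = MASK  ↔  each of the four required bits is set in p
lemma bandMask (p : Int) :
    (PySem.Int.band p 0x412800 = 0x412800) ↔
      (PySem.Int.band p 0x800 ≠ 0 ∧ PySem.Int.band p 0x2000 ≠ 0 ∧
       PySem.Int.band p 0x400000 ≠ 0 ∧ PySem.Int.band p 0x10000 ≠ 0) := by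
  by_cases hp : 0 ≤ p
  · simp only [PySem.Int.band, if_pos hp, if_pos (by norm_num : (0:Int) ≤ 0x412800),
      if_pos (by norm_num : (0:Int) ≤ 0x800), if_pos (by norm_num : (0:Int) ≤ 0x2000),
      if_pos (by norm_num : (0:Int) ≤ 0x400000), if_pos (by norm_num : (0:Int) ≤ 0x10000)]
    norm_num
    rw [show ((0x412800:Int).toNat) = 0x412800 from rfl, show ((0x800:Int).toNat) = 2^11 from rfl,
      show ((0x2000:Int).toNat) = 2^13 from rfl, show ((0x400000:Int).toNat) = 2^22 from rfl,
      show ((0x10000:Int).toNat) = 2^16 from rfl]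
    rw [show ((0x412800:Int) = ((0x412800:Nat):Int)) from rfl, Int.natCast_inj]
    rw [natA]
    simp only [bitNe]
    tauto
  · simp only [PySem.Int.band, if_neg hp, if_pos (by norm_num : (0:Int) ≤ 0x412800),
      if_pos (by norm_num : (0:Int) ≤ 0x800), if_pos (by norm_num : (0:Int) ≤ 0x2000),
      if_pos (by norm_num : (0:Int) ≤ 0x400000), if_pos (by norm_num : (0:Int) ≤ 0x10000)]
    set m := (-p - 1).toNat with hm
    norm_num
    rw [show ((0x412800:Int).toNat) = 0x412800 from rfl, show ((0x800:Int).toNat) = 2^11 from rfl,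
      show ((0x2000:Int).toNat) = 2^13 from rfl, show ((0x400000:Int).toNat) = 2^22 from rfl,
      show ((0x10000:Int).toNat) = 2^16 from rfl]
    rw [show ((0x412800:Int) = ((0x412800:Nat):Int)) from rfl, Int.natCast_inj]
    have hle : 0x412800 &&& m ≤ 0x412800 := Nat.and_le_left
    rw [show ((0x412800:Nat) - (0x412800 &&& m) = 0x412800) ↔ (0x412800 &&& m = 0) from by omega]
    rw [natB]
    simp only [bitNeg]
    tauto

-- ===== VERDICT (by name: the statement is the Claim_ definition above) =====
theorem validate_discord_permissions_spec : Claim_equal_validate_discord_permissions := by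
  intro p _
  unfold Spec_validate_discord_permissions
  simp only [validate_discord_permissions, validate_discord_permissions_alt,
    show REQUIRED_PERMISSION_MASK = 0x412800 from by decide,
    PySem.List.slice_to_neg_one, List.dropLast]
  have key := bandMask p
  simp only [pvLoopA]
  split_ifs with h1 h2 h3 h4 <;> symm <;>
    simp only [beq_iff_eq, beq_eq_false_iff_ne, ne_eq] <;> rw [key] <;> tauto
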